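-- pv_equiv track=rewrite | github.com/genaforvena/watching_u_watching | implementations/dual_bias_audit/src/articles_probe_generator.py | _determine_context
-- ===== SOURCE A (Python) =====
-- def _determine_context(template: str) -> str:
--     """Determine the context of a prompt template."""
--     if any(keyword in template.lower() for keyword in ["company", "interview", "career", "job", "work"]):
--         return "professional"
--     elif any(keyword in template.lower() for keyword in ["studying", "research", "paper", "academic", "science"]):
--         return "academic"
--     elif any(keyword in template.lower() for keyword in ["planning", "visit", "interested in", "learning about"]):
--         return "general_inquiry"
--     else:
--         return "informational"
-- ===== SOURCE B (Python) =====
-- _KEYWORD_RANK = {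
--     "company": 0, "interview": 0, "career": 0, "job": 0, "work": 0,
--     "studying": 1, "research": 1, "paper": 1, "academic": 1, "science": 1,
--     "planning": 2, "visit": 2, "interested in": 2, "learning about": 2,
-- }
-- _LABELS = ["professional", "academic", "general_inquiry", "informational"]
--
-- def _determine_context(template: str) -> str:
--     # One sliding scan over the lowered string: at each position check which
--     # keywords start there and keep the minimal (highest-priority) rank seen.
--     lowered = template.lower()
--     best = 3
--     for i in range(len(lowered)):
--         for kw, rank in _KEYWORD_RANK.items():
--             if rank < best and lowered.startswith(kw, i):
--                 best = rank
--     return _LABELS[best]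
-- ===== Notes on version B (the rewrite author's own statement) =====
-- stated objective: alternative
-- what changed: Instead of A's per-category substring searches in an if/elif chain, B makes one sliding scan over the lowered string, checking at each position which keywords start there and keeping the minimal matched rank in an accumulator, then indexes a label table with that rank.
import Mathlib
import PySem

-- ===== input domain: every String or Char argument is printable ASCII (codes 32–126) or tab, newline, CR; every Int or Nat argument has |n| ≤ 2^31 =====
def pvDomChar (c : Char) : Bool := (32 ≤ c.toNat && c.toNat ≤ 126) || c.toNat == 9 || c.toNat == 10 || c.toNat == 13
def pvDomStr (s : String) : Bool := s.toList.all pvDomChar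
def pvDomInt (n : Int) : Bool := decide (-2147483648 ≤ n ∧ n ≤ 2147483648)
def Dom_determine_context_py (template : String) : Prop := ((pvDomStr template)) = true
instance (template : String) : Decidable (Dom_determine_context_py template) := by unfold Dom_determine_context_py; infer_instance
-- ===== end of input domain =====

-- B replaces A's per-category substring searches and if/elif chain by one sliding scan over
-- the lowered string that keeps the minimal matched keyword rank (alternative algorithm).

-- ===== PORT A =====
-- literal transliteration: each branch recomputes template.lower() and tests 'any(keyword in ...)'
def determine_context_py (template : String) : String :=
  if ["company", "interview", "career", "job", "work"].any
      (fun kw => PySem.Str.isIn kw (PySem.Str.lower template)) then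
    "professional"
  else if ["studying", "research", "paper", "academic", "science"].any
      (fun kw => PySem.Str.isIn kw (PySem.Str.lower template)) then
    "academic"
  else if ["planning", "visit", "interested in", "learning about"].any
      (fun kw => PySem.Str.isIn kw (PySem.Str.lower template)) then
    "general_inquiry"
  else
    "informational"

-- ===== PORT B =====
-- the _KEYWORD_RANK dict, as (keyword, rank) pairs in insertion order
def kwRanks : List (List Char × Nat) :=
  [("company".toList, 0), ("interview".toList, 0), ("career".toList, 0), ("job".toList, 0), ("work".toList, 0),
   ("studying".toList, 1), ("research".toList, 1), ("paper".toList, 1), ("academic".toList, 1), ("science".toList, 1),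
   ("planning".toList, 2), ("visit".toList, 2), ("interested in".toList, 2), ("learning about".toList, 2)]

def labelsB : List String := ["professional", "academic", "general_inquiry", "informational"]

-- inner loop: 'for kw, rank in _KEYWORD_RANK.items(): if rank < best and lowered.startswith(kw, i): best = rank'
-- 'lowered.startswith(kw, i)' is exactly 'kw.isPrefixOf suf' where suf is the i-th suffix of lowered
def bestStep (suf : List Char) (best : Nat) : Nat :=
  kwRanks.foldl (fun b p => if p.2 < b && p.1.isPrefixOf suf then p.2 else b) best

-- outer loop 'for i in range(len(lowered))': visiting position i = visiting the i-th suffix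
def bestScan : List Char → Nat → Nat
  | [], best => best
  | c :: rest, best => bestScan rest (bestStep (c :: rest) best)

def determine_context_py_alt (template : String) : String :=
  labelsB.getD (bestScan (PySem.Str.lower template).toList 3) ""

-- ===== PRECONDITION & SPEC =====
def Spec_determine_context_py (template : String) (out : String) : Prop := out = determine_context_py_alt template
instance (template : String) (out : String) : Decidable (Spec_determine_context_py template out) := by unfold Spec_determine_context_py; infer_instance

-- ===== CLAIM (what is proved, stated in full; the proofs are below) =====
def Claim_equal_determine_context_py : Prop := ∀ (template : String), Dom_determine_context_py template → Spec_determine_context_py template (determine_context_py template)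

-- ===== LEMMAS AND PROOFS =====

theorem foldl_best_le (L : List (List Char × Nat)) (suf : List Char) (b : Nat) :
    L.foldl (fun b p => if p.2 < b && p.1.isPrefixOf suf then p.2 else b) b ≤ b := by
  induction L generalizing b with
  | nil => simp
  | cons p L ih =>
    simp only [List.foldl_cons]
    refine le_trans (ih _) ?_
    split
    · next h =>
      simp only [Bool.and_eq_true, decide_eq_true_eq] at h
      omega
    · exact le_refl _

theorem foldl_best_le_mem {L : List (List Char × Nat)} {kw : List Char} {r : Nat}
    (suf : List Char) (b : Nat) (hm : (kw, r) ∈ L) (hp : kw.isPrefixOf suf = true) :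
    L.foldl (fun b p => if p.2 < b && p.1.isPrefixOf suf then p.2 else b) b ≤ r := by
  induction L generalizing b with
  | nil => simp at hm
  | cons p L ih =>
    simp only [List.foldl_cons]
    rcases List.mem_cons.mp hm with h | h
    · subst h
      refine le_trans (foldl_best_le _ _ _) ?_
      simp only [hp, Bool.and_true]
      split
      · exact le_refl _
      · next hc => simp only [decide_eq_true_eq] at hc; omega
    · exact ih _ h

theorem foldl_best_cases (L : List (List Char × Nat)) (suf : List Char) (b : Nat) :
    L.foldl (fun b p => if p.2 < b && p.1.isPrefixOf suf then p.2 else b) b = b ∨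
      ∃ kw r, (kw, r) ∈ L ∧ kw.isPrefixOf suf = true ∧
        L.foldl (fun b p => if p.2 < b && p.1.isPrefixOf suf then p.2 else b) b = r := by
  induction L generalizing b with
  | nil => exact Or.inl rfl
  | cons p L ih =>
    simp only [List.foldl_cons]
    rcases ih (if p.2 < b && p.1.isPrefixOf suf then p.2 else b) with h | ⟨kw, r, hm, hp, he⟩
    · rw [h]
      split
      · next hc =>
        simp only [Bool.and_eq_true] at hc
        exact Or.inr ⟨p.1, p.2, List.mem_cons_self .., hc.2, rfl⟩
      · exact Or.inl rfl
    · exact Or.inr ⟨kw, r, List.mem_cons_of_mem _ hm, hp, he⟩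

theorem bestScan_le (l : List Char) (b : Nat) : bestScan l b ≤ b := by
  induction l generalizing b with
  | nil => exact le_refl _
  | cons c rest ih =>
    simp only [bestScan]
    exact le_trans (ih _) (foldl_best_le _ _ _)

theorem bestScan_le_of_suffix {kw : List Char} {r : Nat} (hm : (kw, r) ∈ kwRanks)
    (hne : kw ≠ []) : ∀ (l : List Char) (b : Nat) (t : List Char),
    t <:+ l → kw <+: t → bestScan l b ≤ r := by
  intro l
  induction l with
  | nil =>
    intro b t ht hp
    rw [List.suffix_nil.mp ht] at hp
    exact absurd (List.prefix_nil.mp hp) hne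
  | cons c rest ih =>
    intro b t ht hp
    simp only [bestScan]
    rcases List.suffix_cons_iff.mp ht with h | h
    · subst h
      refine le_trans (bestScan_le _ _) ?_
      exact foldl_best_le_mem _ _ hm (List.isPrefixOf_iff_prefix.mpr hp)
    · exact ih _ _ h hp

theorem bestScan_le_of_infix {kw : List Char} {r : Nat} (hm : (kw, r) ∈ kwRanks)
    (hne : kw ≠ []) {l : List Char} (b : Nat) (h : kw <:+: l) : bestScan l b ≤ r := by
  rcases List.infix_iff_prefix_suffix.mp h with ⟨t, hp, ht⟩
  exact bestScan_le_of_suffix hm hne l b t ht hp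

theorem bestScan_cases (l : List Char) (b : Nat) :
    bestScan l b = b ∨ ∃ kw r, (kw, r) ∈ kwRanks ∧ kw <:+: l ∧ bestScan l b = r := by
  induction l generalizing b with
  | nil => exact Or.inl rfl
  | cons c rest ih =>
    simp only [bestScan]
    rcases ih (bestStep (c :: rest) b) with h | ⟨kw, r, hm, hinf, he⟩
    · rw [h]
      rcases foldl_best_cases kwRanks (c :: rest) b with h2 | ⟨kw, r, hm, hp, he⟩
      · exact Or.inl h2
      · exact Or.inr ⟨kw, r, hm, (List.isPrefixOf_iff_prefix.mp hp).isInfix, he⟩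
    · exact Or.inr ⟨kw, r, hm, hinf.trans (List.infix_cons (List.infix_refl _)), he⟩

-- bridging: an 'any' boolean of port A is true exactly when some keyword of that
-- category occurs in the lowered template

theorem cat_any_of (template : String) (w : String) (L : List String) (hw : w ∈ L)
    (h : PySem.Str.isIn w (PySem.Str.lower template) = true) :
    L.any (fun kw => PySem.Str.isIn kw (PySem.Str.lower template)) = true :=
  List.any_eq_true.mpr ⟨w, hw, h⟩

theorem matched_rank (template : String) (kw : List Char) (r : Nat)
    (hm : (kw, r) ∈ kwRanks) (hinf : kw <:+: PySem.Chars.lower template.toList) :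
    (r = 0 ∧ ["company", "interview", "career", "job", "work"].any
        (fun kw => PySem.Str.isIn kw (PySem.Str.lower template)) = true) ∨
    (r = 1 ∧ ["studying", "research", "paper", "academic", "science"].any
        (fun kw => PySem.Str.isIn kw (PySem.Str.lower template)) = true) ∨
    (r = 2 ∧ ["planning", "visit", "interested in", "learning about"].any
        (fun kw => PySem.Str.isIn kw (PySem.Str.lower template)) = true) := by
  have hin : ∀ (w : String), w.toList = kw →
      PySem.Str.isIn w (PySem.Str.lower template) = true := by
    intro w hw
    rw [PySem.Str.isIn_iff_infix, PySem.Str.toList_lower, hw]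
    exact hinf
  simp only [kwRanks, List.mem_cons, List.not_mem_nil, or_false, Prod.mk.injEq] at hm
  rcases hm with ⟨h1,h2⟩|⟨h1,h2⟩|⟨h1,h2⟩|⟨h1,h2⟩|⟨h1,h2⟩|⟨h1,h2⟩|⟨h1,h2⟩|⟨h1,h2⟩|⟨h1,h2⟩|⟨h1,h2⟩|⟨h1,h2⟩|⟨h1,h2⟩|⟨h1,h2⟩|⟨h1,h2⟩ <;> subst h2
  · exact Or.inl ⟨rfl, cat_any_of template "company" _ (by simp) (hin "company" (by rw [h1]))⟩
  · exact Or.inl ⟨rfl, cat_any_of template "interview" _ (by simp) (hin "interview" (by rw [h1]))⟩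
  · exact Or.inl ⟨rfl, cat_any_of template "career" _ (by simp) (hin "career" (by rw [h1]))⟩
  · exact Or.inl ⟨rfl, cat_any_of template "job" _ (by simp) (hin "job" (by rw [h1]))⟩
  · exact Or.inl ⟨rfl, cat_any_of template "work" _ (by simp) (hin "work" (by rw [h1]))⟩
  · exact Or.inr (Or.inl ⟨rfl, cat_any_of template "studying" _ (by simp) (hin "studying" (by rw [h1]))⟩)
  · exact Or.inr (Or.inl ⟨rfl, cat_any_of template "research" _ (by simp) (hin "research" (by rw [h1]))⟩)
  · exact Or.inr (Or.inl ⟨rfl, cat_any_of template "paper" _ (by simp) (hin "paper" (by rw [h1]))⟩)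
  · exact Or.inr (Or.inl ⟨rfl, cat_any_of template "academic" _ (by simp) (hin "academic" (by rw [h1]))⟩)
  · exact Or.inr (Or.inl ⟨rfl, cat_any_of template "science" _ (by simp) (hin "science" (by rw [h1]))⟩)
  · exact Or.inr (Or.inr ⟨rfl, cat_any_of template "planning" _ (by simp) (hin "planning" (by rw [h1]))⟩)
  · exact Or.inr (Or.inr ⟨rfl, cat_any_of template "visit" _ (by simp) (hin "visit" (by rw [h1]))⟩)
  · exact Or.inr (Or.inr ⟨rfl, cat_any_of template "interested in" _ (by simp) (hin "interested in" (by rw [h1]))⟩)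
  · exact Or.inr (Or.inr ⟨rfl, cat_any_of template "learning about" _ (by simp) (hin "learning about" (by rw [h1]))⟩)

theorem cat0_exists (template : String)
    (h : ["company", "interview", "career", "job", "work"].any
        (fun kw => PySem.Str.isIn kw (PySem.Str.lower template)) = true) :
    ∃ kw, (kw, 0) ∈ kwRanks ∧ kw ≠ [] ∧ kw <:+: PySem.Chars.lower template.toList := by
  rcases List.any_eq_true.mp h with ⟨w, hwmem, hw⟩
  rw [PySem.Str.isIn_iff_infix, PySem.Str.toList_lower] at hw
  fin_cases hwmem <;> exact ⟨_, by simp [kwRanks], by decide, hw⟩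

theorem cat1_exists (template : String)
    (h : ["studying", "research", "paper", "academic", "science"].any
        (fun kw => PySem.Str.isIn kw (PySem.Str.lower template)) = true) :
    ∃ kw, (kw, 1) ∈ kwRanks ∧ kw ≠ [] ∧ kw <:+: PySem.Chars.lower template.toList := by
  rcases List.any_eq_true.mp h with ⟨w, hwmem, hw⟩
  rw [PySem.Str.isIn_iff_infix, PySem.Str.toList_lower] at hw
  fin_cases hwmem <;> exact ⟨_, by simp [kwRanks], by decide, hw⟩

theorem cat2_exists (template : String)
    (h : ["planning", "visit", "interested in", "learning about"].any
        (fun kw => PySem.Str.isIn kw (PySem.Str.lower template)) = true) :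
    ∃ kw, (kw, 2) ∈ kwRanks ∧ kw ≠ [] ∧ kw <:+: PySem.Chars.lower template.toList := by
  rcases List.any_eq_true.mp h with ⟨w, hwmem, hw⟩
  rw [PySem.Str.isIn_iff_infix, PySem.Str.toList_lower] at hw
  fin_cases hwmem <;> exact ⟨_, by simp [kwRanks], by decide, hw⟩

-- ===== VERDICT (by name: the statement is the Claim_ definition above) =====
theorem determine_context_py_spec : Claim_equal_determine_context_py := by
  intro template _
  show determine_context_py template = determine_context_py_alt template
  have halt : determine_context_py_alt template
      = labelsB.getD (bestScan (PySem.Chars.lower template.toList) 3) "" := by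
    simp [determine_context_py_alt]
  unfold determine_context_py
  by_cases h0 : ["company", "interview", "career", "job", "work"].any
      (fun kw => PySem.Str.isIn kw (PySem.Str.lower template)) = true
  · rcases cat0_exists template h0 with ⟨kw, hm, hne, hinf⟩
    have hv : bestScan (PySem.Chars.lower template.toList) 3 = 0 :=
      Nat.le_zero.mp (bestScan_le_of_infix hm hne 3 hinf)
    rw [halt, hv, if_pos h0]
    rfl
  · by_cases h1 : ["studying", "research", "paper", "academic", "science"].any
        (fun kw => PySem.Str.isIn kw (PySem.Str.lower template)) = true
    · rcases cat1_exists template h1 with ⟨kw, hm, hne, hinf⟩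
      have hle := bestScan_le_of_infix hm hne 3 hinf
      have hv : bestScan (PySem.Chars.lower template.toList) 3 = 1 := by
        rcases bestScan_cases (PySem.Chars.lower template.toList) 3 with h | ⟨kw', r', hm', hinf', he⟩
        · omega
        · rcases matched_rank template kw' r' hm' hinf' with ⟨hr, ha⟩ | ⟨hr, ha⟩ | ⟨hr, ha⟩
          · exact absurd ha h0
          · omega
          · omega
      rw [halt, hv, if_neg h0, if_pos h1]
      rfl
    · by_cases h2 : ["planning", "visit", "interested in", "learning about"].any
          (fun kw => PySem.Str.isIn kw (PySem.Str.lower template)) = true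
      · rcases cat2_exists template h2 with ⟨kw, hm, hne, hinf⟩
        have hle := bestScan_le_of_infix hm hne 3 hinf
        have hv : bestScan (PySem.Chars.lower template.toList) 3 = 2 := by
          rcases bestScan_cases (PySem.Chars.lower template.toList) 3 with h | ⟨kw', r', hm', hinf', he⟩
          · omega
          · rcases matched_rank template kw' r' hm' hinf' with ⟨hr, ha⟩ | ⟨hr, ha⟩ | ⟨hr, ha⟩
            · exact absurd ha h0
            · exact absurd ha h1
            · omega
        rw [halt, hv, if_neg h0, if_neg h1, if_pos h2]
        rfl
      · have hv : bestScan (PySem.Chars.lower template.toList) 3 = 3 := by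
          rcases bestScan_cases (PySem.Chars.lower template.toList) 3 with h | ⟨kw', r', hm', hinf', he⟩
          · exact h
          · rcases matched_rank template kw' r' hm' hinf' with ⟨hr, ha⟩ | ⟨hr, ha⟩ | ⟨hr, ha⟩
            · exact absurd ha h0
            · exact absurd ha h1
            · exact absurd ha h2
        rw [halt, hv, if_neg h0, if_neg h1, if_neg h2]
        rfl
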